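-- pv_equiv track=rewrite | github.com/spy-token-saving/token-savior | src/token_savior/typescript_annotator.py | _find_arrow_body_start
-- ===== SOURCE A (Python) =====
-- def _find_arrow_body_start(lines: list[str], start_0: int) -> tuple[int, bool]:
--     """Find the start line of an arrow-function body.
--
--     Returns (line_index, has_block_body).
--     """
--     seen_arrow = False
--     arrow_line = -1
--     for idx in range(start_0, min(start_0 + 20, len(lines))):
--         line = lines[idx]
--         if "=>" in line:
--             seen_arrow = True
--             arrow_line = idx
--         if not seen_arrow:
--             continue
--         if "{" in line:
--             return idx, True
--         if idx == arrow_line: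
--             continue
--         if line.strip():
--             return idx, False
--     return start_0, False
-- ===== SOURCE B (Python) =====
-- def _find_arrow_body_start(lines: list[str], start_0: int) -> tuple[int, bool]:
--     """Find the start line of an arrow-function body.
--
--     Returns (line_index, has_block_body).
--     """
--     window = [(i, lines[i]) for i in range(start_0, min(start_0 + 20, len(lines)))]
--     arrow = next((i for i, l in window if "=>" in l), None)
--     if arrow is None:
--         return start_0, False
--     # Two independent candidate positions at or after the arrow:
--     # the first brace line, and the first non-blank plain line (no brace, no arrow).
--     brace = next((i for i, l in window if i >= arrow and "{" in l), None)
--     plain = next((i for i, l in window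
--                   if i >= arrow and "{" not in l and "=>" not in l and l.strip()), None)
--     if brace is not None and (plain is None or brace < plain):
--         return brace, True
--     if plain is not None:
--         return plain, False
--     return start_0, False
-- ===== Notes on version B (the rewrite author's own statement) =====
-- stated objective: alternative
-- what changed: Replaces A's single stateful early-return scan (seen_arrow/arrow_line accumulators) by three independent declarative searches over a materialized window: first arrow line, first brace line at/after it, first non-blank plain line at/after it, combined by an index comparison to classify the result.
import Mathlib
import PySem

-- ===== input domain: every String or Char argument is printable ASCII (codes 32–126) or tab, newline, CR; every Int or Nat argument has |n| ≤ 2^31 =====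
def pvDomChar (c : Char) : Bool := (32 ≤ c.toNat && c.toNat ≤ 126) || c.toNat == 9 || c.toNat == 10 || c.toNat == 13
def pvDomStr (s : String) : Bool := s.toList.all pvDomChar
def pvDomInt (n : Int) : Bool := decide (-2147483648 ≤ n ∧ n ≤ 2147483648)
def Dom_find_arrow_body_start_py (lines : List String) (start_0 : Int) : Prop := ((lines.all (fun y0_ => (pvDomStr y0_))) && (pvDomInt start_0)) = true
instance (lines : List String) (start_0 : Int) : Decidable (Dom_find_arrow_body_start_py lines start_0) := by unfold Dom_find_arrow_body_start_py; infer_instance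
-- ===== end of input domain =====

-- B replaces A's single stateful early-return scan by three independent declarative searches
-- over a materialized window (first arrow line, first brace line at/after it, first non-blank
-- plain line at/after it) combined by an index comparison: alternative decomposition, same cost.

-- ===== PORT A =====
-- A's for-loop over range(start_0, min(start_0+20, len(lines))) with state (seen_arrow, arrow_line);
-- lines[idx] is PySem.List.pyGetD (exact under Pre_, which puts every window index in range).
def pvALoop (lines : List String) (s0 : Int) : List Int → Bool → Int → Int × Bool
  | [], _, _ => (s0, false)
  | idx :: rest, seen_arrow, arrow_line =>
    let line := PySem.List.pyGetD lines idx ""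
    let seen_arrow := seen_arrow || PySem.Str.isIn "=>" line
    let arrow_line := if PySem.Str.isIn "=>" line then idx else arrow_line
    if !seen_arrow then pvALoop lines s0 rest seen_arrow arrow_line
    else if PySem.Str.isIn "{" line then (idx, true)
    else if idx = arrow_line then pvALoop lines s0 rest seen_arrow arrow_line
    else if PySem.Str.strip line ≠ "" then (idx, false)
    else pvALoop lines s0 rest seen_arrow arrow_line

def find_arrow_body_start_py (lines : List String) (start_0 : Int) : Int × Bool :=
  pvALoop lines start_0
    (PySem.List.pyRange start_0 (min (start_0 + 20) (lines.length : Int)) 1) false (-1)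

-- ===== PORT B =====
-- window = [(i, lines[i]) for i in range(start_0, min(start_0 + 20, len(lines)))]
def pvW (lines : List String) (s e : Int) : List (Int × String) :=
  (PySem.List.pyRange s e 1).map (fun i => (i, PySem.List.pyGetD lines i ""))

-- the three generator conditions of Source B
def pvArrowP (il : Int × String) : Bool := PySem.Str.isIn "=>" il.2
def pvBraceP (il : Int × String) : Bool := PySem.Str.isIn "{" il.2
def pvPlainP (il : Int × String) : Bool :=
  !PySem.Str.isIn "{" il.2 && !PySem.Str.isIn "=>" il.2 && !(PySem.Str.strip il.2 == "")

-- final if-chain of Source B ("if brace is not None and (plain is None or brace < plain) …")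
def pvCombine (start_0 : Int) : Option (Int × String) → Option (Int × String) → Int × Bool
  | some bl, some pl => if bl.1 < pl.1 then (bl.1, true) else (pl.1, false)
  | some bl, none => (bl.1, true)
  | none, some pl => (pl.1, false)
  | none, none => (start_0, false)

-- each 'next((i for i, l in window if P), None)' is (window.filter P).head?
def find_arrow_body_start_py_alt (lines : List String) (start_0 : Int) : Int × Bool :=
  match ((pvW lines start_0 (min (start_0 + 20) (lines.length : Int))).filter pvArrowP).head? with
  | none => (start_0, false)
  | some al =>
    pvCombine start_0
      (((pvW lines start_0 (min (start_0 + 20) (lines.length : Int))).filter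
          (fun il => decide (al.1 ≤ il.1) && pvBraceP il)).head?)
      (((pvW lines start_0 (min (start_0 + 20) (lines.length : Int))).filter
          (fun il => decide (al.1 ≤ il.1) && pvPlainP il)).head?)

-- ===== PRECONDITION & SPEC =====
-- Pre_ excludes exactly the inputs where A raises IndexError (start_0 < -len(lines), so the
-- first window access lines[start_0] is out of range); B raises there too.
def Pre_find_arrow_body_start_py (lines : List String) (start_0 : Int) : Prop :=
  -(lines.length : Int) ≤ start_0
instance (lines : List String) (start_0 : Int) : Decidable (Pre_find_arrow_body_start_py lines start_0) := by unfold Pre_find_arrow_body_start_py; infer_instance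

def pvWitness_find_arrow_body_start_py : List String × Int := (["const f = () =>", "{", "}"], 0)

def Spec_find_arrow_body_start_py (lines : List String) (start_0 : Int) (out : Int × Bool) : Prop := out = find_arrow_body_start_py_alt lines start_0
instance (lines : List String) (start_0 : Int) (out : Int × Bool) : Decidable (Spec_find_arrow_body_start_py lines start_0 out) := by unfold Spec_find_arrow_body_start_py; infer_instance

-- ===== CLAIM (what is proved, stated in full; the proofs are below) =====
def Claim_equal_find_arrow_body_start_py : Prop := ∀ (lines : List String) (start_0 : Int), Dom_find_arrow_body_start_py lines start_0 → Pre_find_arrow_body_start_py lines start_0 → Spec_find_arrow_body_start_py lines start_0 (find_arrow_body_start_py lines start_0)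

-- ===== LEMMAS AND PROOFS =====

theorem pvW_nil (lines : List String) {s e : Int} (h : e ≤ s) : pvW lines s e = [] := by
  unfold pvW; rw [PySem.List.pyRange_one_eq_nil h]; rfl

theorem pvW_cons (lines : List String) {s e : Int} (h : s < e) :
    pvW lines s e = (s, PySem.List.pyGetD lines s "") :: pvW lines (s + 1) e := by
  unfold pvW; rw [PySem.List.pyRange_one_cons h]; rfl

-- Any element of the filtered window (in particular its head) has index in [s, e).
theorem pvHead_bound (lines : List String) {s e : Int} (q : Int × String → Bool)
    {x : Int × String} (h : ((pvW lines s e).filter q).head? = some x) : s ≤ x.1 ∧ x.1 < e := by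
  have hx : x ∈ (pvW lines s e).filter q := List.mem_of_mem_head? (by simp [h])
  have hx' : x ∈ pvW lines s e := (List.mem_filter.mp hx).1
  unfold pvW at hx'
  rcases List.mem_map.mp hx' with ⟨i, hi, hix⟩
  rcases (PySem.List.mem_pyRange_one).mp hi with ⟨h1, h2⟩
  subst hix; exact ⟨h1, h2⟩

-- Phase 2: after the arrow has been seen (arrow_line = t below every remaining index),
-- A's loop equals the brace/plain combination over the remaining window.
theorem pvPhase2 (lines : List String) (s0 e : Int) :
    ∀ (n : Nat) (s t : Int), (e - s).toNat = n → t < s →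
      pvALoop lines s0 (PySem.List.pyRange s e 1) true t =
        pvCombine s0 (((pvW lines s e).filter pvBraceP).head?)
          (((pvW lines s e).filter pvPlainP).head?) := by
  intro n
  induction n with
  | zero =>
    intro s t hn _
    rw [PySem.List.pyRange_one_eq_nil (by omega), pvW_nil lines (by omega : e ≤ s)]
    rfl
  | succ m ih =>
    intro s t hn ht
    have hse : s < e := by omega
    rw [PySem.List.pyRange_one_cons hse, pvW_cons lines hse]
    by_cases hb : PySem.Str.isIn "{" (PySem.List.pyGetD lines s "") = true
    · -- brace: A returns (s, true); brace head = s, plain skips s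
      rw [List.filter_cons_of_pos (by simp only [pvBraceP]; rw [hb]),
        List.filter_cons_of_neg (by simp only [pvPlainP]; rw [hb]; simp)]
      simp only [pvALoop, Bool.true_or, Bool.not_true, Bool.false_eq_true, if_false, hb,
        if_true, List.head?_cons]
      rcases hp : ((pvW lines (s + 1) e).filter pvPlainP).head? with _ | cl
      · rfl
      · have hc := pvHead_bound lines pvPlainP hp
        simp only [pvCombine]
        rw [if_pos (by omega)]
    · by_cases ha : PySem.Str.isIn "=>" (PySem.List.pyGetD lines s "") = true
      · -- arrow line: A continues (idx = arrow_line); both filters skip s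
        rw [Bool.not_eq_true] at hb
        rw [List.filter_cons_of_neg (by simp only [pvBraceP]; rw [hb]; simp),
          List.filter_cons_of_neg (by simp only [pvPlainP]; rw [ha]; simp)]
        simp only [pvALoop, Bool.true_or, Bool.not_true, Bool.false_eq_true, if_false, hb,
          ha, if_true]
        exact ih (s + 1) s (by omega) (by omega)
      · by_cases hs : PySem.Str.strip (PySem.List.pyGetD lines s "") = ""
        · -- blank line: A continues; both filters skip s
          rw [Bool.not_eq_true] at hb ha
          rw [List.filter_cons_of_neg (by simp only [pvBraceP]; rw [hb]; simp),
            List.filter_cons_of_neg (by simp only [pvPlainP]; rw [hs]; simp)]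
          simp only [pvALoop, Bool.true_or, Bool.not_true, Bool.false_eq_true, if_false, hb,
            ha]
          rw [if_neg (by omega : ¬ s = t), if_neg (fun h => h hs)]
          exact ih (s + 1) t (by omega) (by omega)
        · -- non-blank plain line: A returns (s, false); plain head = s, brace skips s
          rw [Bool.not_eq_true] at hb ha
          rw [List.filter_cons_of_neg (by simp only [pvBraceP]; rw [hb]; simp),
            List.filter_cons_of_pos (by simp only [pvPlainP]; rw [hb, ha]; simp [hs])]
          simp only [pvALoop, Bool.true_or, Bool.not_true, Bool.false_eq_true, if_false, hb,
            ha, List.head?_cons]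
          rw [if_neg (by omega : ¬ s = t), if_pos hs]
          rcases hbr : ((pvW lines (s + 1) e).filter pvBraceP).head? with _ | bl
          · rfl
          · have hc := pvHead_bound lines pvBraceP hbr
            simp only [pvCombine]
            rw [if_neg (by omega)]

-- Phase 1: before the arrow is seen, A's loop equals "find first arrow, then combine from it".
theorem pvPhase1 (lines : List String) (s0 e : Int) :
    ∀ (n : Nat) (s t : Int), (e - s).toNat = n →
      pvALoop lines s0 (PySem.List.pyRange s e 1) false t =
        (match ((pvW lines s e).filter pvArrowP).head? with
         | none => (s0, false)
         | some al =>
           pvCombine s0 (((pvW lines al.1 e).filter pvBraceP).head?)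
             (((pvW lines al.1 e).filter pvPlainP).head?)) := by
  intro n
  induction n with
  | zero =>
    intro s t hn
    rw [PySem.List.pyRange_one_eq_nil (by omega), pvW_nil lines (by omega : e ≤ s)]
    rfl
  | succ m ih =>
    intro s t hn
    have hse : s < e := by omega
    rw [PySem.List.pyRange_one_cons hse, pvW_cons lines hse]
    by_cases ha : PySem.Str.isIn "=>" (PySem.List.pyGetD lines s "") = true
    · -- arrow found at s
      rw [List.filter_cons_of_pos (by simp only [pvArrowP]; rw [ha])]
      simp only [List.head?_cons]
      rw [pvW_cons lines hse]
      by_cases hb : PySem.Str.isIn "{" (PySem.List.pyGetD lines s "") = true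
      · rw [List.filter_cons_of_pos (by simp only [pvBraceP]; rw [hb]),
          List.filter_cons_of_neg (by simp only [pvPlainP]; rw [hb]; simp)]
        simp only [pvALoop, ha, Bool.false_or, Bool.not_true, Bool.false_eq_true, if_false,
          hb, if_true, List.head?_cons]
        rcases hp : ((pvW lines (s + 1) e).filter pvPlainP).head? with _ | cl
        · rfl
        · have hc := pvHead_bound lines pvPlainP hp
          simp only [pvCombine]
          rw [if_pos (by omega)]
      · rw [Bool.not_eq_true] at hb
        rw [List.filter_cons_of_neg (by simp only [pvBraceP]; rw [hb]; simp),
          List.filter_cons_of_neg (by simp only [pvPlainP]; rw [ha]; simp)]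
        simp only [pvALoop, ha, Bool.false_or, Bool.not_true, Bool.false_eq_true, if_false,
          hb, if_true]
        exact pvPhase2 lines s0 e m (s + 1) s (by omega) (by omega)
    · -- no arrow at s: A continues with seen = false
      rw [Bool.not_eq_true] at ha
      rw [List.filter_cons_of_neg (by simp only [pvArrowP]; rw [ha]; simp)]
      simp only [pvALoop, ha, Bool.or_false, Bool.false_eq_true, if_false, Bool.not_false,
        if_true]
      exact ih (s + 1) t (by omega)

-- Bridge: B's filters with the 'a ≤ i' condition over the full window equal the plain
-- filters over the window starting at a.
theorem pvFilterFrom (lines : List String) (s0 a e : Int) (p : Int × String → Bool)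
    (h1 : s0 ≤ a) (h2 : a ≤ e) :
    (pvW lines s0 e).filter (fun il => decide (a ≤ il.1) && p il) =
      (pvW lines a e).filter p := by
  unfold pvW
  rw [PySem.List.pyRange_one_append s0 a e h1 h2, List.map_append, List.filter_append]
  have h3 : ((PySem.List.pyRange s0 a 1).map
      (fun i => (i, PySem.List.pyGetD lines i ""))).filter
        (fun il => decide (a ≤ il.1) && p il) = [] := by
    rw [List.filter_eq_nil_iff]
    intro x hx
    rcases List.mem_map.mp hx with ⟨i, hi, hix⟩
    rcases (PySem.List.mem_pyRange_one).mp hi with ⟨_, hlt⟩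
    subst hix
    intro hcon
    rw [Bool.and_eq_true, decide_eq_true_eq] at hcon
    omega
  have h4 : ((PySem.List.pyRange a e 1).map
      (fun i => (i, PySem.List.pyGetD lines i ""))).filter
        (fun il => decide (a ≤ il.1) && p il) =
      ((PySem.List.pyRange a e 1).map (fun i => (i, PySem.List.pyGetD lines i ""))).filter p := by
    apply List.filter_congr
    intro x hx
    rcases List.mem_map.mp hx with ⟨i, hi, hix⟩
    rcases (PySem.List.mem_pyRange_one).mp hi with ⟨hle, _⟩
    subst hix
    simp [hle]
  rw [h3, h4, List.nil_append]

-- ===== VERDICT (by name: the statement is the Claim_ definition above) =====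
theorem find_arrow_body_start_py_spec : Claim_equal_find_arrow_body_start_py := by
  intro lines start_0 _ _
  unfold Spec_find_arrow_body_start_py find_arrow_body_start_py find_arrow_body_start_py_alt
  rw [pvPhase1 lines start_0 (min (start_0 + 20) (lines.length : Int))
    ((min (start_0 + 20) (lines.length : Int) - start_0).toNat) start_0 (-1) rfl]
  rcases har : ((pvW lines start_0 (min (start_0 + 20) (lines.length : Int))).filter
      pvArrowP).head? with _ | al
  · rfl
  · have hb := pvHead_bound lines pvArrowP har
    dsimp only
    rw [pvFilterFrom lines start_0 al.1 (min (start_0 + 20) (lines.length : Int)) pvBraceP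
        (by omega) (by omega),
      pvFilterFrom lines start_0 al.1 (min (start_0 + 20) (lines.length : Int)) pvPlainP
        (by omega) (by omega)]
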